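-- pv_equiv track=rewrite | github.com/justadudewhohacks/colabsnippets | colabsnippets/face_detection/augment/utils.py | filter_abs_landmarks_out_of_borders
-- ===== SOURCE A (Python) =====
-- def filter_abs_landmarks_out_of_borders(abs_landmarks, hw):
--   filtered_landmarks = []
--   for l in abs_landmarks:
--     num_out_of_img = 0
--     for x, y in l:
--       if x < 0 or y < 0 or x > hw[1] or y > hw[0]:
--         num_out_of_img += 1
--     if num_out_of_img < len(l):
--       filtered_landmarks.append(l)
--   return filtered_landmarks
-- ===== SOURCE B (Python) =====
-- def filter_abs_landmarks_out_of_borders(abs_landmarks, hw):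
--   h, w = hw[0], hw[1]
--   def violation(l):
--     # signed margin: a point is inside the borders iff its margin is <= 0;
--     # a set is kept iff its best (minimum) margin is <= 0 (empty set -> 1, dropped)
--     return min((max(-x, -y, x - w, y - h) for x, y in l), default=1)
--   return [l for l in abs_landmarks if violation(l) <= 0]
-- ===== Notes on version B (the rewrite author's own statement) =====
-- stated objective: alternative
-- what changed: Replaces A's boolean out-of-bounds counter with a numeric violation-margin computation: each point gets the signed margin max(-x,-y,x-w,y-h), and a set is kept iff the minimum margin over its points (default 1 for an empty set) is <= 0; no counter and no per-point boolean branch.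
import Mathlib
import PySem

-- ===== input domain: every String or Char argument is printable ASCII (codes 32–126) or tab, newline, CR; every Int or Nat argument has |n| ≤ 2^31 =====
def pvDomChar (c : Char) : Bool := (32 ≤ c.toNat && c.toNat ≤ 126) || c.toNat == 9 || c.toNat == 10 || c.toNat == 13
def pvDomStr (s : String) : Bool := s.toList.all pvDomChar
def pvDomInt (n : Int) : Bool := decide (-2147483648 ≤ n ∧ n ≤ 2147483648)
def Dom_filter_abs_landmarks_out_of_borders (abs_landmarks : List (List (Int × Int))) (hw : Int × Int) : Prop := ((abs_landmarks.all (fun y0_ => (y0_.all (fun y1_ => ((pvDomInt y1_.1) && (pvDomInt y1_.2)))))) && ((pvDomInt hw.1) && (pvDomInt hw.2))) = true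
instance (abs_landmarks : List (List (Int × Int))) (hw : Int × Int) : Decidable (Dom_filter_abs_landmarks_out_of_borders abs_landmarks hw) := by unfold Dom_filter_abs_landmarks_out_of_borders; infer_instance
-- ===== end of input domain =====

-- B replaces A's out-of-bounds counter with a numeric violation-margin formulation:
-- a set is kept iff the minimum of max(-x,-y,x-w,y-h) over its points (default 1) is ≤ 0 (objective: alternative).

-- ===== PORT A =====
def filter_abs_landmarks_out_of_borders (abs_landmarks : List (List (Int × Int))) (hw : Int × Int) : List (List (Int × Int)) :=
  abs_landmarks.foldl (fun filtered_landmarks l =>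
    let num_out_of_img : Int :=
      l.foldl (fun num_out_of_img p =>
        if p.1 < 0 ∨ p.2 < 0 ∨ p.1 > hw.2 ∨ p.2 > hw.1 then num_out_of_img + 1 else num_out_of_img) 0
    if num_out_of_img < (l.length : Int) then filtered_landmarks ++ [l] else filtered_landmarks) []

-- ===== PORT B =====
-- Source B's violation(l) = min((max(-x,-y,x-w,y-h) for x,y in l), default=1); Python's min with
-- default is PySem.List.min? (over the mapped scores) with getD.
def pvViolation (h w : Int) (l : List (Int × Int)) : Int :=
  (PySem.List.min? (l.map (fun p => max (max (max (-p.1) (-p.2)) (p.1 - w)) (p.2 - h))) (fun s => s)).getD 1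

def filter_abs_landmarks_out_of_borders_alt (abs_landmarks : List (List (Int × Int))) (hw : Int × Int) : List (List (Int × Int)) :=
  abs_landmarks.filter (fun l => pvViolation hw.1 hw.2 l ≤ 0)

-- ===== PRECONDITION & SPEC =====
def Spec_filter_abs_landmarks_out_of_borders (abs_landmarks : List (List (Int × Int))) (hw : Int × Int) (out : List (List (Int × Int))) : Prop := out = filter_abs_landmarks_out_of_borders_alt abs_landmarks hw
instance (abs_landmarks : List (List (Int × Int))) (hw : Int × Int) (out : List (List (Int × Int))) : Decidable (Spec_filter_abs_landmarks_out_of_borders abs_landmarks hw out) := by unfold Spec_filter_abs_landmarks_out_of_borders; infer_instance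

-- ===== CLAIM =====
def Claim_equal_filter_abs_landmarks_out_of_borders : Prop := ∀ (abs_landmarks : List (List (Int × Int))) (hw : Int × Int), Dom_filter_abs_landmarks_out_of_borders abs_landmarks hw → Spec_filter_abs_landmarks_out_of_borders abs_landmarks hw (filter_abs_landmarks_out_of_borders abs_landmarks hw)

-- ===== LEMMAS AND PROOFS =====

-- A's inner counter counts the out-of-bounds points of l.
theorem pv_count_eq (hw : Int × Int) (l : List (Int × Int)) (acc : Int) :
    l.foldl (fun num_out_of_img p =>
      if p.1 < 0 ∨ p.2 < 0 ∨ p.1 > hw.2 ∨ p.2 > hw.1 then num_out_of_img + 1 else num_out_of_img) acc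
    = acc + ((l.filter (fun p => decide (p.1 < 0 ∨ p.2 < 0 ∨ p.1 > hw.2 ∨ p.2 > hw.1))).length : Int) := by
  induction l generalizing acc with
  | nil => simp
  | cons p t ih =>
    simp only [List.foldl_cons, List.filter_cons]
    by_cases h : p.1 < 0 ∨ p.2 < 0 ∨ p.1 > hw.2 ∨ p.2 > hw.1 <;>
      simp [h, ih] <;> push_cast <;> ring

-- 'count of out-of-bounds < length' ↔ 'some point is in bounds'.
theorem pv_keep_iff (hw : Int × Int) (l : List (Int × Int)) :
    (((l.filter (fun p => decide (p.1 < 0 ∨ p.2 < 0 ∨ p.1 > hw.2 ∨ p.2 > hw.1))).length : Int) < (l.length : Int))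
    ↔ ∃ p ∈ l, ¬(p.1 < 0 ∨ p.2 < 0 ∨ p.1 > hw.2 ∨ p.2 > hw.1) := by
  have hle := List.length_filter_le (fun p => decide (p.1 < 0 ∨ p.2 < 0 ∨ p.1 > hw.2 ∨ p.2 > hw.1)) l
  rw [Int.ofNat_lt]
  constructor
  · intro h
    by_contra hc
    push_neg at hc
    have : (l.filter (fun p => decide (p.1 < 0 ∨ p.2 < 0 ∨ p.1 > hw.2 ∨ p.2 > hw.1))).length = l.length := by
      rw [List.length_filter_eq_length_iff]
      intro a ha
      simpa using hc a ha
    omega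
  · rintro ⟨a, ha, hp⟩
    have : (l.filter (fun p => decide (p.1 < 0 ∨ p.2 < 0 ∨ p.1 > hw.2 ∨ p.2 > hw.1))).length ≠ l.length := by
      intro he
      rw [List.length_filter_eq_length_iff] at he
      exact hp (of_decide_eq_true (he a ha))
    omega

-- B's keep condition: the minimum violation margin is ≤ 0 iff some point is in bounds.
theorem pv_violation_iff (h w : Int) (l : List (Int × Int)) :
    (pvViolation h w l ≤ 0) ↔ ∃ p ∈ l, ¬(p.1 < 0 ∨ p.2 < 0 ∨ p.1 > w ∨ p.2 > h) := by
  unfold pvViolation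
  have hscore : ∀ p : Int × Int,
      (max (max (max (-p.1) (-p.2)) (p.1 - w)) (p.2 - h) ≤ 0) ↔
      ¬(p.1 < 0 ∨ p.2 < 0 ∨ p.1 > w ∨ p.2 > h) := by
    intro p
    simp only [max_le_iff]
    omega
  cases hm : PySem.List.min? (l.map (fun p => max (max (max (-p.1) (-p.2)) (p.1 - w)) (p.2 - h))) (fun s => s) with
  | none =>
    rw [PySem.List.min?_eq_none_iff, List.map_eq_nil_iff] at hm
    subst hm
    simp
  | some m =>
    have hmem := PySem.List.min?_mem hm
    have hmin := PySem.List.min?_isMin hm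
    simp only [Option.getD_some]
    constructor
    · intro hle
      rcases List.mem_map.mp hmem with ⟨p, hp, hpm⟩
      exact ⟨p, hp, (hscore p).mp (hpm ▸ hle)⟩
    · rintro ⟨p, hp, hin⟩
      have := hmin _ (List.mem_map.mpr ⟨p, hp, rfl⟩)
      exact le_trans this ((hscore p).mpr hin)

-- A's fold with append-accumulator equals B's margin filter.
theorem pv_fold_eq (hw : Int × Int) (abs_landmarks : List (List (Int × Int))) (acc : List (List (Int × Int))) :
    abs_landmarks.foldl (fun filtered_landmarks l =>
      let num_out_of_img : Int :=
        l.foldl (fun num_out_of_img p =>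
          if p.1 < 0 ∨ p.2 < 0 ∨ p.1 > hw.2 ∨ p.2 > hw.1 then num_out_of_img + 1 else num_out_of_img) 0
      if num_out_of_img < (l.length : Int) then filtered_landmarks ++ [l] else filtered_landmarks) acc
    = acc ++ abs_landmarks.filter (fun l => pvViolation hw.1 hw.2 l ≤ 0) := by
  induction abs_landmarks generalizing acc with
  | nil => simp
  | cons l t ih =>
    simp only [List.foldl_cons, List.filter_cons, pv_count_eq, zero_add]
    have hiff : (((l.filter (fun p => decide (p.1 < 0 ∨ p.2 < 0 ∨ p.1 > hw.2 ∨ p.2 > hw.1))).length : Int) < (l.length : Int))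
        ↔ pvViolation hw.1 hw.2 l ≤ 0 := (pv_keep_iff hw l).trans (pv_violation_iff hw.1 hw.2 l).symm
    by_cases hk : pvViolation hw.1 hw.2 l ≤ 0
    · rw [if_pos (hiff.mpr hk)]
      have ih' := ih (acc ++ [l])
      simp only [pv_count_eq, zero_add] at ih'
      rw [ih']
      simp [hk]
    · rw [if_neg (fun hlt => hk (hiff.mp hlt))]
      have ih' := ih acc
      simp only [pv_count_eq, zero_add] at ih'
      rw [ih']
      simp [hk]

-- ===== VERDICT =====
theorem filter_abs_landmarks_out_of_borders_spec : Claim_equal_filter_abs_landmarks_out_of_borders := by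
  intro abs_landmarks hw _
  unfold Spec_filter_abs_landmarks_out_of_borders filter_abs_landmarks_out_of_borders filter_abs_landmarks_out_of_borders_alt
  simpa using pv_fold_eq hw abs_landmarks []
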